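-- pv_equiv track=rewrite | github.com/gongyizhi0425/pytorch_assignment | LLM_pruning/src/run_attention_sink.py | _fixed_len_prefix_ids
-- ===== SOURCE A (Python) =====
-- def _fixed_len_prefix_ids(prefix_ids: list[int], prefix_len: int) -> list[int]:
--     """Return a fixed-length prefix token-id list.
--
--     If prefix_ids is shorter than prefix_len, repeat it cyclically.
--     If longer, truncate.
--     """
--     if prefix_len <= 0:
--         return []
--     if not prefix_ids:
--         return []
--     if len(prefix_ids) >= prefix_len:
--         return list(prefix_ids[:prefix_len])
--     out: list[int] = []
--     i = 0
--     while len(out) < prefix_len: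
--         out.append(int(prefix_ids[i % len(prefix_ids)]))
--         i += 1
--     return out
-- ===== SOURCE B (Python) =====
-- def _fixed_len_prefix_ids(prefix_ids: list[int], prefix_len: int) -> list[int]:
--     """Return a fixed-length prefix token-id list (closed-form repeat + slice)."""
--     if prefix_len <= 0 or not prefix_ids:
--         return []
--     if len(prefix_ids) >= prefix_len:
--         return list(prefix_ids[:prefix_len])
--     reps = prefix_len // len(prefix_ids) + 1
--     return [int(x) for x in (prefix_ids * reps)[:prefix_len]]
-- ===== Notes on version B (the rewrite author's own statement) =====
-- stated objective: simpler
-- what changed: Replaced the index-and-modulo while-loop that appends one element at a time with a closed-form repetition count (prefix_len // len + 1), list multiplication and a slice.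
import Mathlib
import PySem

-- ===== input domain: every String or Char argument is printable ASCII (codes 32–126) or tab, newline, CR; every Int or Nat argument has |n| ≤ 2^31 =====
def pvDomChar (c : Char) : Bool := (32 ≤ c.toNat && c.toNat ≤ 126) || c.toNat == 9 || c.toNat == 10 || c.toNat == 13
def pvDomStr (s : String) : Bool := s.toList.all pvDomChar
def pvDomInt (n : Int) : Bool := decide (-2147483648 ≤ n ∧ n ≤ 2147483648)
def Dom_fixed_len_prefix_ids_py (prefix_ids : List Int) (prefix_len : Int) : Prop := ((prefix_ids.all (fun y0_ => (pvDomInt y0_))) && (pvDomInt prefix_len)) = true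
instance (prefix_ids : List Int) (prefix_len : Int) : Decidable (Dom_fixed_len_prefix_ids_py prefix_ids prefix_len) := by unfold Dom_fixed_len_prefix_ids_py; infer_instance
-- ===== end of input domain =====

-- B replaces A's index/modulo while-loop with a closed-form repeat-and-slice (simpler; same cost).

-- ===== PORT A =====
-- the while-loop: append prefix_ids[i % len] until len(out) = prefix_len.
-- the index i % length is always in range (the loop is only entered with prefix_ids ≠ []),
-- so getD is exact for the Python indexing here.
def pvALoop (ids : List Int) (L : Int) (out : List Int) (i : Nat) : List Int :=
  if (out.length : Int) < L then
    pvALoop ids L (out ++ [ids.getD (i % ids.length) 0]) (i + 1)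
  else out
termination_by (L.toNat - out.length)
decreasing_by simp; omega

def fixed_len_prefix_ids_py (prefix_ids : List Int) (prefix_len : Int) : List Int :=
  if prefix_len ≤ 0 then []
  else if prefix_ids = [] then []
  else if (prefix_ids.length : Int) ≥ prefix_len then PySem.List.slice prefix_ids none (some prefix_len)
  else pvALoop prefix_ids prefix_len [] 0

-- ===== PORT B =====
def fixed_len_prefix_ids_py_alt (prefix_ids : List Int) (prefix_len : Int) : List Int :=
  if prefix_len ≤ 0 ∨ prefix_ids = [] then []
  else if (prefix_ids.length : Int) ≥ prefix_len then PySem.List.slice prefix_ids none (some prefix_len)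
  else
    let reps := PySem.Int.floordiv prefix_len prefix_ids.length + 1
    (List.flatten (List.replicate reps.toNat prefix_ids)).take prefix_len.toNat

-- ===== PRECONDITION & SPEC =====
def Spec_fixed_len_prefix_ids_py (prefix_ids : List Int) (prefix_len : Int) (out : List Int) : Prop := out = fixed_len_prefix_ids_py_alt prefix_ids prefix_len
instance (prefix_ids : List Int) (prefix_len : Int) (out : List Int) : Decidable (Spec_fixed_len_prefix_ids_py prefix_ids prefix_len out) := by unfold Spec_fixed_len_prefix_ids_py; infer_instance

-- ===== CLAIM (what is proved, stated in full; the proofs are below) =====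
def Claim_equal_fixed_len_prefix_ids_py : Prop := ∀ (prefix_ids : List Int) (prefix_len : Int), Dom_fixed_len_prefix_ids_py prefix_ids prefix_len → Spec_fixed_len_prefix_ids_py prefix_ids prefix_len (fixed_len_prefix_ids_py prefix_ids prefix_len)

-- ===== LEMMAS AND PROOFS =====

lemma pvALoop_spec (ids : List Int) (L : Int) :
    ∀ (k : Nat) (out : List Int) (i : Nat), (out.length : Int) + k = L →
      pvALoop ids L out i = out ++ (List.range k).map (fun j => ids.getD ((i + j) % ids.length) 0) := by
  intro k
  induction k with
  | zero =>
    intro out i h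
    rw [pvALoop, if_neg (by omega)]
    simp
  | succ k ih =>
    intro out i h
    rw [pvALoop, if_pos (by push_cast at h ⊢; omega)]
    rw [ih (out ++ [ids.getD (i % ids.length) 0]) (i + 1) (by simp; push_cast at h ⊢; omega)]
    have hmap : (List.range (k + 1)).map (fun j => ids.getD ((i + j) % ids.length) 0)
        = ids.getD (i % ids.length) 0 ::
          (List.range k).map (fun j => ids.getD ((i + 1 + j) % ids.length) 0) := by
      rw [List.range_succ_eq_map, List.map_cons, List.map_map]
      refine List.cons_eq_cons.mpr ⟨by simp, List.map_congr_left ?_⟩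
      intro j _
      have hj : i + (j + 1) = i + 1 + j := by omega
      simp [Function.comp, hj]
    rw [hmap]
    simp

lemma pvFlat_get? (ids : List Int) (r : Nat) :
    ∀ (j : Nat), j < r * ids.length →
      (List.flatten (List.replicate r ids))[j]? = ids[j % ids.length]? := by
  induction r with
  | zero => intro j hj; simp at hj
  | succ r ih =>
    intro j hj
    rw [Nat.succ_mul] at hj
    rw [List.replicate_succ, List.flatten_cons]
    by_cases h : j < ids.length
    · rw [List.getElem?_append_left h, Nat.mod_eq_of_lt h]
    · push Not at h
      rw [List.getElem?_append_right h, ih (j - ids.length) (by omega)]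
      rw [Nat.mod_eq_sub_mod h]

lemma pvTake_flatten (ids : List Int) (hne : ids ≠ []) (r m : Nat) (hm : m ≤ r * ids.length) :
    (List.flatten (List.replicate r ids)).take m
      = (List.range m).map (fun j => ids.getD (j % ids.length) 0) := by
  have hn : 0 < ids.length := List.length_pos_iff.mpr hne
  apply List.ext_getElem?
  intro j
  by_cases hj : j < m
  · rw [List.getElem?_take_of_lt hj, pvFlat_get? ids r j (by omega)]
    have hjm : j % ids.length < ids.length := Nat.mod_lt _ hn
    rw [List.getElem?_eq_getElem hjm, List.getElem?_map, List.getElem?_range hj]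
    simp [List.getElem?_eq_getElem hjm]
  · have h1 : (((List.flatten (List.replicate r ids)).take m))[j]? = none := by
      rw [List.getElem?_eq_none]
      simp; omega
    have h2 : ((List.range m).map (fun j => ids.getD (j % ids.length) 0))[j]? = none := by
      rw [List.getElem?_eq_none]; simp; omega
    rw [h1, h2]

-- ===== VERDICT (by name: the statement is the Claim_ definition above) =====
theorem fixed_len_prefix_ids_py_spec : Claim_equal_fixed_len_prefix_ids_py := by
  intro ids L _
  unfold Spec_fixed_len_prefix_ids_py fixed_len_prefix_ids_py fixed_len_prefix_ids_py_alt
  by_cases hL : L ≤ 0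
  · simp [hL]
  · by_cases hnil : ids = []
    · simp [hnil, hL]
    · by_cases hge : (ids.length : Int) ≥ L
      · simp [hL, hnil, hge]
      · simp only [hL, hnil, hge, or_self, if_false]
        have hn : 0 < ids.length := List.length_pos_iff.mpr hnil
        have hLpos : 0 < L := by omega
        have hcastL : ((L.toNat : Int)) = L := Int.toNat_of_nonneg (by omega)
        -- left side: the loop result
        rw [pvALoop_spec ids L L.toNat [] 0 (by simp [hcastL])]
        simp only [List.nil_append, Nat.zero_add]
        -- right side: take of the flattened replicate
        set q := PySem.Int.floordiv L (ids.length : Int) with hq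
        have hq0 : 0 ≤ q := by
          rw [hq, PySem.Int.le_floordiv_iff_mul_le (by exact_mod_cast hn)]
          simp
          omega
        have hLlt : L < (q + 1) * (ids.length : Int) := by
          rw [← PySem.Int.floordiv_lt_iff_lt_mul (by exact_mod_cast hn), ← hq]
          omega
        have hrep : L.toNat ≤ (q + 1).toNat * ids.length := by
          have h1 : ((q + 1).toNat : Int) = q + 1 := Int.toNat_of_nonneg (by omega)
          have h2 : (((q + 1).toNat * ids.length : Nat) : Int) = (q + 1) * (ids.length : Int) := by
            push_cast [h1]; ring
          have h3 : (L.toNat : Int) ≤ (((q + 1).toNat * ids.length : Nat) : Int) := by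
            rw [h2, hcastL]; linarith [hLlt]
          exact_mod_cast h3
        rw [pvTake_flatten ids hnil (q + 1).toNat L.toNat hrep]
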